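-- pv_equiv track=rewrite | github.com/ankur198/AishPythonPractice | rpattern.py | printW
-- ===== SOURCE A (Python) =====
-- def printW(n):
--
--     result = []
--     outers = 0
--     inners = 2 + 4*((n-3)//2) + n
--
--     for i in range(((n+1)//2)-1):
--         result.append(' '*outers + '*'+' '*inners+"*" + '-'*outers)
--         outers += 1
--         inners -= 2
--
--     inner1 = n-2
--     result.append(' '*outers+'*'+' '*inner1+'*'+' '*inner1+'*' + '-'*outers)
--
--     outers += 1
--     inner1 -= 2
--     inner2 = 1
--     for i in range((n+1)//2 - 2):
--         result.append(' '*outers+'*'+' '*inner1+'*' + ' ' * inner2 + '*' + ' '*inner1+'*' + '-'*outers)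
--         outers += 1
--         inner1 -= 2
--         inner2 += 2
--     result.append(' '*outers+'*'+' '*inner2+'*' + '-'*outers)
--     return result
-- ===== SOURCE B (Python) =====
-- def printW(n):
--     # Single pass over the global row index r.  Each row is classified into one
--     # of four regions and described by its list of inner gap widths (closed
--     # affine formulas of r); a uniform renderer turns (r, gaps) into the line.
--     k = (n + 1) // 2
--     k1 = max(0, k - 1)
--     k2 = max(0, k - 2)
--     total = k1 + 1 + k2 + 1
--
--     def render(r, gaps):
--         return ' ' * r + '*' + ''.join(' ' * g + '*' for g in gaps) + '-' * r
--
--     out = []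
--     for r in range(total):
--         if r < k - 1:                       # upper outer region
--             gaps = [2 + 4 * ((n - 3) // 2) + n - 2 * r]
--         elif r == k1:                       # the three-star middle line
--             gaps = [n - 2, n - 2]
--         elif r < total - 1:                 # lower five-star region
--             gaps = [n - 4 - 2 * (r - k1 - 1), 2 * (r - k1) - 1, n - 4 - 2 * (r - k1 - 1)]
--         else:                               # final line
--             gaps = [2 * k2 + 1]
--         out.append(render(r, gaps))
--     return out
-- ===== Notes on version B (the rewrite author's own statement) =====
-- stated objective: alternative
-- what changed: Replaces A's three staged loops with four mutating counters (outers/inners/inner1/inner2) by one pass over the global row index r that classifies each row into one of four regions and feeds closed-form gap lists to a single uniform line renderer.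
import Mathlib
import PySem

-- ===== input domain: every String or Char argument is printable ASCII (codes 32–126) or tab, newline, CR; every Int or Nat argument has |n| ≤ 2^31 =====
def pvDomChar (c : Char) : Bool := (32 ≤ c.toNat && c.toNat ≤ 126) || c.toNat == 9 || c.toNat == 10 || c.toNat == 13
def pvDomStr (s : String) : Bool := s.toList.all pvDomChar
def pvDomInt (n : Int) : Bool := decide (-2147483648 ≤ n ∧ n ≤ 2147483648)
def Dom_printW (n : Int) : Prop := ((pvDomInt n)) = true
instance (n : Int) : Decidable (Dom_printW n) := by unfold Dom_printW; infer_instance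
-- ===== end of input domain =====

-- B replaces A's three staged loops with mutating counters by one pass over the
-- global row index that classifies each row and renders it from closed-form gap
-- lists (objective: alternative, same cost).

-- Python "c * k" for Int k (empty for k ≤ 0), as a character list; lines are built as
-- List Char and packed with String.ofList so the kernel can evaluate them.
def pvRep (c : Char) (k : Int) : List Char := List.replicate k.toNat c

-- ===== PORT A =====
def printW (n : Int) : List String :=
  let inners0 : Int := 2 + 4 * (PySem.Int.floordiv (n - 3) 2) + n
  let s1 := (PySem.List.pyRange 0 (PySem.Int.floordiv (n + 1) 2 - 1) 1).foldl
    (fun (st : List String × Int × Int) _ =>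
      (st.1 ++ [String.ofList (pvRep ' ' st.2.1 ++ ['*'] ++ pvRep ' ' st.2.2 ++ ['*'] ++ pvRep '-' st.2.1)],
       st.2.1 + 1, st.2.2 - 2))
    ([], 0, inners0)
  let outers := s1.2.1
  let inner1 : Int := n - 2
  let result := s1.1 ++ [String.ofList (pvRep ' ' outers ++ ['*'] ++ pvRep ' ' inner1 ++ ['*'] ++ pvRep ' ' inner1 ++ ['*'] ++ pvRep '-' outers)]
  let s2 := (PySem.List.pyRange 0 (PySem.Int.floordiv (n + 1) 2 - 2) 1).foldl
    (fun (st : List String × Int × Int × Int) _ =>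
      (st.1 ++ [String.ofList (pvRep ' ' st.2.1 ++ ['*'] ++ pvRep ' ' st.2.2.1 ++ ['*'] ++ pvRep ' ' st.2.2.2 ++ ['*'] ++ pvRep ' ' st.2.2.1 ++ ['*'] ++ pvRep '-' st.2.1)],
       st.2.1 + 1, st.2.2.1 - 2, st.2.2.2 + 2))
    (result, outers + 1, inner1 - 2, 1)
  s2.1 ++ [String.ofList (pvRep ' ' s2.2.1 ++ ['*'] ++ pvRep ' ' s2.2.2.2 ++ ['*'] ++ pvRep '-' s2.2.1)]

-- ===== PORT B =====
-- render(r, gaps) = ' '*r + '*' + ''.join(' '*g + '*' for g in gaps) + '-'*r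
def pvRender (r : Int) (gaps : List Int) : String :=
  String.ofList (pvRep ' ' r ++ ['*'] ++ gaps.flatMap (fun g => pvRep ' ' g ++ ['*']) ++ pvRep '-' r)

def printW_alt (n : Int) : List String :=
  let k : Int := PySem.Int.floordiv (n + 1) 2
  let k1 : Int := max 0 (k - 1)
  let k2 : Int := max 0 (k - 2)
  let total : Int := k1 + 1 + k2 + 1
  (PySem.List.pyRange 0 total 1).foldl
    (fun (out : List String) r =>
      let gaps : List Int :=
        if r < k - 1 then [2 + 4 * (PySem.Int.floordiv (n - 3) 2) + n - 2 * r]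
        else if r = k1 then [n - 2, n - 2]
        else if r < total - 1 then [n - 4 - 2 * (r - k1 - 1), 2 * (r - k1) - 1, n - 4 - 2 * (r - k1 - 1)]
        else [2 * k2 + 1]
      out ++ [pvRender r gaps]) []

-- ===== PRECONDITION & SPEC =====
def Spec_printW (n : Int) (out : List String) : Prop := out = printW_alt n
instance (n : Int) (out : List String) : Decidable (Spec_printW n out) := by unfold Spec_printW; infer_instance

-- ===== CLAIM (what is proved, stated in full; the proofs are below) =====
def Claim_equal_printW : Prop := ∀ (n : Int), Dom_printW n → Spec_printW n (printW n)

-- ===== LEMMAS AND PROOFS =====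

theorem foldA1 (m : Nat) (res : List String) (o inn : Int) :
    (List.range m).foldl
      (fun (st : List String × Int × Int) _ =>
        (st.1 ++ [String.ofList (pvRep ' ' st.2.1 ++ ['*'] ++ pvRep ' ' st.2.2 ++ ['*'] ++ pvRep '-' st.2.1)],
         st.2.1 + 1, st.2.2 - 2))
      (res, o, inn)
    = (res ++ (List.range m).map (fun k =>
        String.ofList (pvRep ' ' (o + k) ++ ['*'] ++ pvRep ' ' (inn - 2 * k) ++ ['*'] ++ pvRep '-' (o + k))),
       o + m, inn - 2 * m) := by
  induction m with
  | zero => simp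
  | succ m ih =>
    rw [List.range_succ, List.foldl_append, ih]
    simp only [List.foldl_cons, List.foldl_nil, List.append_assoc]
    refine Prod.ext ?_ (Prod.ext ?_ ?_) <;> simp <;> ring_nf

theorem foldA2 (m : Nat) (res : List String) (o i1 i2 : Int) :
    (List.range m).foldl
      (fun (st : List String × Int × Int × Int) _ =>
        (st.1 ++ [String.ofList (pvRep ' ' st.2.1 ++ ['*'] ++ pvRep ' ' st.2.2.1 ++ ['*'] ++ pvRep ' ' st.2.2.2 ++ ['*'] ++ pvRep ' ' st.2.2.1 ++ ['*'] ++ pvRep '-' st.2.1)],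
         st.2.1 + 1, st.2.2.1 - 2, st.2.2.2 + 2))
      (res, o, i1, i2)
    = (res ++ (List.range m).map (fun k =>
        String.ofList (pvRep ' ' (o + k) ++ ['*'] ++ pvRep ' ' (i1 - 2 * k) ++ ['*'] ++ pvRep ' ' (i2 + 2 * k) ++ ['*'] ++ pvRep ' ' (i1 - 2 * k) ++ ['*'] ++ pvRep '-' (o + k))),
       o + m, i1 - 2 * m, i2 + 2 * m) := by
  induction m with
  | zero => simp
  | succ m ih =>
    rw [List.range_succ, List.foldl_append, ih]
    simp only [List.foldl_cons, List.foldl_nil, List.append_assoc]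
    refine Prod.ext ?_ (Prod.ext ?_ (Prod.ext ?_ ?_)) <;> simp <;> ring_nf

-- B's append-loop is the map of its body over the row indices.
theorem foldB {α : Type} (f : α → String) (l : List α) (acc : List String) :
    l.foldl (fun out r => out ++ [f r]) acc = acc ++ l.map f := by
  induction l generalizing acc with
  | nil => simp
  | cons x xs ih => simp [ih]

-- ===== VERDICT (by name: the statement is the Claim_ definition above) =====
theorem printW_spec : Claim_equal_printW := by
  intro n _
  show printW n = printW_alt n
  unfold printW printW_alt
  simp only [PySem.List.pyRange_one, List.foldl_map, Int.sub_zero]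
  rw [foldA1, foldA2, foldB]
  set K : Int := PySem.Int.floordiv (n + 1) 2 with hK
  set I0 : Int := 2 + 4 * PySem.Int.floordiv (n - 3) 2 + n with hI0
  set k1n : Nat := (K - 1).toNat with hk1n
  set k2n : Nat := (K - 2).toNat with hk2n
  have hmax1 : max 0 (K - 1) = (k1n : Int) := by omega
  have hmax2 : max 0 (K - 2) = (k2n : Int) := by omega
  have htot : ((k1n : Int) + 1 + k2n + 1).toNat = k1n + 1 + k2n + 1 := by omega
  rw [hmax1, hmax2, htot]
  dsimp only
  simp only [List.nil_append, List.append_assoc, bind_pure_comp, List.map_eq_map,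
    List.map_map, Function.comp_def, Int.zero_add]
  have hsplit : List.range (k1n + 1 + k2n + 1)
      = (List.range k1n ++ [k1n]) ++ ((List.range k2n).map (fun j => k1n + 1 + j) ++ [k1n + 1 + k2n]) := by
    rw [List.range_succ, List.range_add, List.range_succ]
    simp [List.append_assoc]
  rw [hsplit]
  simp only [List.map_append, List.map_map, List.map_cons, List.map_nil, Function.comp_def,
    List.append_assoc]
  symm
  congr 1
  · apply List.map_congr_left
    intro y hy
    have hy' : y < k1n := List.mem_range.mp hy
    rw [if_pos (show (y : Int) < K - 1 by omega)]
    simp [pvRender, List.flatMap]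
  congr 1
  · rw [if_neg (show ¬((k1n : Int) < K - 1) by omega)]
    simp [pvRender, List.flatMap]
  congr 1
  · apply List.map_congr_left
    intro x hx
    have hx' : x < k2n := List.mem_range.mp hx
    rw [if_neg (show ¬((↑(k1n + 1 + x) : Int) < K - 1) by omega),
        if_neg (show ¬((↑(k1n + 1 + x) : Int) = ↑k1n) by omega),
        if_pos (show ((↑(k1n + 1 + x) : Int) < ↑k1n + 1 + ↑k2n + 1 - 1) by omega)]
    simp [pvRender, List.flatMap]
    ring_nf
  · rw [if_neg (show ¬((↑(k1n + 1 + k2n) : Int) < K - 1) by omega),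
        if_neg (show ¬((↑(k1n + 1 + k2n) : Int) = ↑k1n) by omega),
        if_neg (show ¬((↑(k1n + 1 + k2n) : Int) < ↑k1n + 1 + ↑k2n + 1 - 1) by omega)]
    simp [pvRender, List.flatMap]
    ring_nf
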